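-- pv_equiv track=rewrite | github.com/nugroho1234/journal-analyzer | preprocess_journal/article_tools/preprocess_article.py | recombine_elements
-- ===== SOURCE A (Python) =====
-- def recombine_elements(categorized_elements, table_summaries, text_summaries, table_indices, text_indices):
--     """
--     A function to recombine text and table elements into a list.
--     This function takes the summaries and recombine it into the correct order
--     based on the categorized_elements, table_indices, and text_indices gained
--     from separate_table_and_text function.
--
--     Input:
--     categorezed_elements: List -> List of all the elements in the pdf file
--     table_summaries: List -> List of table summaries done by LLM
--     text_summaries: List -> List of text summaries done by LLM
--     table_indices: List -> List of indices of the table elements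
--     text_indices: List -> List of indices of the text elements
--
--     Output:
--     combined_elements -> List of combined summaries in the correct order
--     """
--     combined_elements = []
--     for i in range(len(categorized_elements)):
--         if i in table_indices:
--             combined_elements.append(table_summaries[table_indices.index(i)])
--         elif i in text_indices:
--             combined_elements.append(text_summaries[text_indices.index(i)])
--     return combined_elements
-- ===== SOURCE B (Python) =====
-- def recombine_elements(categorized_elements, table_summaries, text_summaries, table_indices, text_indices):
--     """Scatter summaries into a sentinel-filled buffer by index, then compact.
--
--     One pass over each index list replaces A's per-position membership and
--     .index scans; a slot is filled only on its first occurrence, and tables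
--     are scattered before texts, so first-occurrence and table-priority
--     behaviour are preserved.
--     """
--     n = len(categorized_elements)
--     sentinel = object()
--     buf = [sentinel] * n
--     for pos, i in enumerate(table_indices):
--         if 0 <= i < n and buf[i] is sentinel:
--             buf[i] = table_summaries[pos]
--     for pos, i in enumerate(text_indices):
--         if 0 <= i < n and buf[i] is sentinel:
--             buf[i] = text_summaries[pos]
--     return [x for x in buf if x is not sentinel]
-- ===== Notes on version B (the rewrite author's own statement) =====
-- stated objective: faster
-- what changed: Replaces A's per-position membership test plus .index() scan over both index lists with a single scatter of each summary list into a sentinel-filled buffer (first occurrence wins, tables before texts) followed by one compaction pass.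
import Mathlib
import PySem

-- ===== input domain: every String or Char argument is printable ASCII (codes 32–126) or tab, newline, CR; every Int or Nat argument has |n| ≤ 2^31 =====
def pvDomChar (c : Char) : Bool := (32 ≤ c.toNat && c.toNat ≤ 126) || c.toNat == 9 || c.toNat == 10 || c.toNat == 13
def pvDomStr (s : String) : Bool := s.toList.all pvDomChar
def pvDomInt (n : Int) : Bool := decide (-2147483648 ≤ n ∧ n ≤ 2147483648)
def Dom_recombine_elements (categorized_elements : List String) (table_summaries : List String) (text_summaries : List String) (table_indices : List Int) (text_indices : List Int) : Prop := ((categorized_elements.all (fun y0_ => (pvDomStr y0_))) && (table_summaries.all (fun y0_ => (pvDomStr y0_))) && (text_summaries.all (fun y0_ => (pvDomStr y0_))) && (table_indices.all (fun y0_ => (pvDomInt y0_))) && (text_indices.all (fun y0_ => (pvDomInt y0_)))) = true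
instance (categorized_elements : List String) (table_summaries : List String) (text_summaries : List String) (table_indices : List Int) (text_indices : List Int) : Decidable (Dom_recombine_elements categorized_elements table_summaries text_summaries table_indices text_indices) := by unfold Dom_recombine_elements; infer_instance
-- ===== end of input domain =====

-- B replaces A's per-position membership + .index scans by a single scatter of each
-- summary list into a sentinel buffer followed by compaction (objective: faster).

-- ===== PORT A =====
-- Literal port of A. `summaries[indices.index(i)]` is ported with PySem.List.index?
-- (some under the branch's membership test, so `.getD 0` is never the default there)
-- and PySem.List.pyGet?; the `.getD ""` is reached exactly where Python raises
-- IndexError, which Pre_recombine_elements excludes.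
def recombine_elements (categorized_elements : List String) (table_summaries : List String) (text_summaries : List String) (table_indices : List Int) (text_indices : List Int) : List String :=
  (List.range categorized_elements.length).foldl
    (fun (acc : List String) (i : Nat) =>
      if (i : Int) ∈ table_indices then
        acc ++ [(PySem.List.pyGet? table_summaries (((PySem.List.index? table_indices (i : Int)).getD 0 : Nat) : Int)).getD ""]
      else if (i : Int) ∈ text_indices then
        acc ++ [(PySem.List.pyGet? text_summaries (((PySem.List.index? text_indices (i : Int)).getD 0 : Nat) : Int)).getD ""]
      else acc)
    []

-- ===== PORT B =====
-- `buf[i] = summaries[pos]` guarded by `0 <= i < n and buf[i] is sentinel`; the buffer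
-- holds Option String, `none` being the sentinel. The `.getD ""` on the summary access
-- is reached exactly where Python B raises IndexError (outside Pre_recombine_elements).
def pvScatter (n : Nat) (summaries : List String) (buf : List (Option String)) (p : Int × Int) : List (Option String) :=
  if 0 ≤ p.2 ∧ p.2 < (n : Int) ∧ buf.getD p.2.toNat (some "") = none then
    buf.set p.2.toNat (some ((PySem.List.pyGet? summaries p.1).getD ""))
  else buf

def recombine_elements_alt (categorized_elements : List String) (table_summaries : List String) (text_summaries : List String) (table_indices : List Int) (text_indices : List Int) : List String :=
  let n := categorized_elements.length
  let buf0 : List (Option String) := List.replicate n none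
  let buf1 := (PySem.List.enumerate table_indices 0).foldl (pvScatter n table_summaries) buf0
  let buf2 := (PySem.List.enumerate text_indices 0).foldl (pvScatter n text_summaries) buf1
  buf2.filterMap id

-- ===== PRECONDITION & SPEC =====
-- Pre_ excludes exactly the inputs where Python A raises IndexError: a position whose
-- first occurrence in an index list lies beyond the corresponding summary list.
def Pre_recombine_elements (categorized_elements : List String) (table_summaries : List String) (text_summaries : List String) (table_indices : List Int) (text_indices : List Int) : Prop :=
  ∀ i ∈ List.range categorized_elements.length,
    ((i : Int) ∈ table_indices → (PySem.List.index? table_indices (i : Int)).getD 0 < table_summaries.length) ∧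
    ((i : Int) ∉ table_indices → (i : Int) ∈ text_indices → (PySem.List.index? text_indices (i : Int)).getD 0 < text_summaries.length)
instance (categorized_elements : List String) (table_summaries : List String) (text_summaries : List String) (table_indices : List Int) (text_indices : List Int) : Decidable (Pre_recombine_elements categorized_elements table_summaries text_summaries table_indices text_indices) := by unfold Pre_recombine_elements; infer_instance

def pvWitness_recombine_elements : List String × List String × List String × List Int × List Int :=
  (["a", "b", "c"], ["T0"], ["X0", "X1"], [1], [0, 2])

def Spec_recombine_elements (categorized_elements : List String) (table_summaries : List String) (text_summaries : List String) (table_indices : List Int) (text_indices : List Int) (out : List String) : Prop := out = recombine_elements_alt categorized_elements table_summaries text_summaries table_indices text_indices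
instance (categorized_elements : List String) (table_summaries : List String) (text_summaries : List String) (table_indices : List Int) (text_indices : List Int) (out : List String) : Decidable (Spec_recombine_elements categorized_elements table_summaries text_summaries table_indices text_indices out) := by unfold Spec_recombine_elements; infer_instance

-- ===== CLAIM (what is proved, stated in full; the proofs are below) =====
def Claim_equal_recombine_elements : Prop := ∀ (categorized_elements : List String) (table_summaries : List String) (text_summaries : List String) (table_indices : List Int) (text_indices : List Int), Dom_recombine_elements categorized_elements table_summaries text_summaries table_indices text_indices → Pre_recombine_elements categorized_elements table_summaries text_summaries table_indices text_indices → Spec_recombine_elements categorized_elements table_summaries text_summaries table_indices text_indices (recombine_elements categorized_elements table_summaries text_summaries table_indices text_indices)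

-- ===== LEMMAS AND PROOFS =====

-- A's loop shape: conditional appends are a filterMap over the range.
theorem pv_foldl_if2 {α β : Type} (P Q : α → Prop) [DecidablePred P] [DecidablePred Q]
    (g h : α → β) (l : List α) (acc : List β) :
    l.foldl (fun a x => if P x then a ++ [g x] else if Q x then a ++ [h x] else a) acc
      = acc ++ l.filterMap (fun x => if P x then some (g x) else if Q x then some (h x) else none) := by
  induction l generalizing acc with
  | nil => simp
  | cons x xs ih =>
    simp only [List.foldl_cons, List.filterMap_cons]
    split_ifs with h1 h2 <;> simp [ih]

theorem pv_scatter_length (n : Nat) (s : List String) (l : List (Int × Int)) (b : List (Option String)) :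
    (l.foldl (pvScatter n s) b).length = b.length := by
  induction l generalizing b with
  | nil => rfl
  | cons p rest ih =>
    simp only [List.foldl_cons, ih, pvScatter]
    split_ifs <;> simp

theorem pv_scatter_getD (n : Nat) (s : List String) (l : List (Int × Int)) (b : List (Option String))
    (hb : b.length = n) (j : Nat) :
    (l.foldl (pvScatter n s) b).getD j (some "") =
      match b.getD j (some "") with
      | some t => some t
      | none => (l.find? (fun p => p.2 == (j : Int))).map (fun p => (PySem.List.pyGet? s p.1).getD "") := by
  induction l generalizing b with
  | nil =>
    simp only [List.foldl_nil, List.find?_nil, Option.map_none]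
    cases hbj : b.getD j (some "") <;> rfl
  | cons p rest ih =>
    have hjlen : b.getD j (some "") = none → j < b.length := by
      intro h
      by_contra hge
      rw [List.getD_eq_getElem?_getD, List.getElem?_eq_none (by omega)] at h
      simp at h
    simp only [List.foldl_cons, List.find?_cons]
    have hlen' : (pvScatter n s b p).length = n := by
      unfold pvScatter; split_ifs <;> simp [hb]
    rw [ih _ hlen']
    unfold pvScatter
    by_cases hg : 0 ≤ p.2 ∧ p.2 < (n : Int) ∧ b.getD p.2.toNat (some "") = none
    · rw [if_pos hg]
      by_cases hij : p.2 = (j : Int)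
      · have hjt : p.2.toNat = j := by omega
        have hjn : b.getD j (some "") = none := hjt ▸ hg.2.2
        have hjlt : j < b.length := hjlen hjn
        rw [hjt]
        rw [List.getD_eq_getElem?_getD, List.getElem?_set_self (by omega)]
        rw [List.getD_eq_getElem?_getD] at hjn
        have hpj : (p.2 == (j : Int)) = true := by simp [hij]
        simp [hjn, hpj]
      · have hne : p.2.toNat ≠ j := by omega
        rw [List.getD_eq_getElem?_getD, List.getElem?_set_ne hne, ← List.getD_eq_getElem?_getD]
        have : (p.2 == (j : Int)) = false := by simp [hij]
        simp only [this]
    · rw [if_neg hg]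
      cases hbj : b.getD j (some "") with
      | some t => simp
      | none =>
        have hjlt : j < b.length := hjlen hbj
        have hij : (p.2 == (j : Int)) = false := by
          by_contra hc
          have : p.2 = (j : Int) := by simpa using hc
          apply hg
          refine ⟨by omega, by omega, ?_⟩
          have : p.2.toNat = j := by omega
          rw [this]; exact hbj
        simp only [hij]

-- find? over enumerate locates exactly the first index of the value.
theorem pv_find_enumerate (l : List Int) (v : Int) (s : Int) :
    (PySem.List.enumerate l s).find? (fun p => p.2 == v)
      = (PySem.List.index? l v).map (fun k => (s + (k : Int), v)) := by
  induction l generalizing s with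
  | nil => simp [PySem.List.enumerate_nil]
  | cons x xs ih =>
    rw [PySem.List.enumerate_cons, List.find?_cons]
    by_cases hx : x = v
    · subst hx
      rw [PySem.List.index?_cons_self]
      simp
    · rw [PySem.List.index?_cons_of_ne xs hx]
      have hb : (((s, x) : Int × Int).2 == v) = false := by simp [hx]
      simp only [hb, ih]
      cases PySem.List.index? xs v with
      | none => simp
      | some k => simp; omega

-- the single-slot value both programs compute at position j
def pvSlot (table_summaries : List String) (text_summaries : List String) (table_indices : List Int) (text_indices : List Int) (j : Nat) : Option String :=
  if (j : Int) ∈ table_indices then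
    some ((PySem.List.pyGet? table_summaries (((PySem.List.index? table_indices (j : Int)).getD 0 : Nat) : Int)).getD "")
  else if (j : Int) ∈ text_indices then
    some ((PySem.List.pyGet? text_summaries (((PySem.List.index? text_indices (j : Int)).getD 0 : Nat) : Int)).getD "")
  else none

theorem pv_alt_eq (ce tabs texts : List String) (ti xi : List Int) :
    recombine_elements_alt ce tabs texts ti xi
      = (List.range ce.length).filterMap (pvSlot tabs texts ti xi) := by
  show List.filterMap id
      ((PySem.List.enumerate xi 0).foldl (pvScatter ce.length texts)
        ((PySem.List.enumerate ti 0).foldl (pvScatter ce.length tabs)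
          (List.replicate ce.length (none : Option String))))
    = (List.range ce.length).filterMap (pvSlot tabs texts ti xi)
  set n := ce.length with hn
  set buf1 := (PySem.List.enumerate ti 0).foldl (pvScatter n tabs) (List.replicate n none) with hbuf1
  set buf2 := (PySem.List.enumerate xi 0).foldl (pvScatter n texts) buf1 with hbuf2
  have hlen1 : buf1.length = n := by rw [hbuf1, pv_scatter_length]; simp
  have hlen2 : buf2.length = n := by rw [hbuf2, pv_scatter_length]; exact hlen1
  have hgetD : ∀ j : Nat, j < n → buf2.getD j (some "") = pvSlot tabs texts ti xi j := by
    intro j hj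
    have h1 : buf1.getD j (some "") =
        ((PySem.List.enumerate ti 0).find? (fun p => p.2 == (j : Int))).map
          (fun p => (PySem.List.pyGet? tabs p.1).getD "") := by
      rw [hbuf1, pv_scatter_getD n tabs _ _ (by simp) j]
      have : (List.replicate n (none : Option String)).getD j (some "") = none := by
        rw [List.getD_eq_getElem?_getD, List.getElem?_replicate_of_lt hj]; rfl
      rw [this]
    rw [hbuf2, pv_scatter_getD n texts _ _ hlen1 j, h1, pv_find_enumerate ti (j : Int) 0,
      pv_find_enumerate xi (j : Int) 0]
    unfold pvSlot
    by_cases hti : (j : Int) ∈ ti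
    · obtain ⟨k, hk⟩ := Option.isSome_iff_exists.mp ((PySem.List.index?_isSome_iff ti ((j:Int))).mpr hti)
      have hk' := hk; rw [PySem.List.index?_eq_idxOf?] at hk'
      simp [hti, hk']
    · have hnone : PySem.List.index? ti (j : Int) = none := (PySem.List.index?_eq_none_iff _ _).mpr hti
      have hnoneI := hnone; rw [PySem.List.index?_eq_idxOf?] at hnoneI
      by_cases hxi : (j : Int) ∈ xi
      · obtain ⟨k, hk⟩ := Option.isSome_iff_exists.mp ((PySem.List.index?_isSome_iff xi ((j:Int))).mpr hxi)
        have hk' := hk; rw [PySem.List.index?_eq_idxOf?] at hk'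
        simp [hti, hxi, hnoneI, hk']
      · have hnone' : PySem.List.index? xi (j : Int) = none := (PySem.List.index?_eq_none_iff _ _).mpr hxi
        have hnoneI' := hnone'; rw [PySem.List.index?_eq_idxOf?] at hnoneI'
        simp [hti, hxi, hnoneI, hnoneI']
  have hbuf : buf2 = (List.range n).map (pvSlot tabs texts ti xi) := by
    apply List.ext_getElem
    · simp [hlen2]
    · intro j hj hj'
      have hjn : j < n := by simpa [hlen2] using hj
      have := hgetD j hjn
      rw [List.getD_eq_getElem?_getD, List.getElem?_eq_getElem hj] at this
      simp only [Option.getD_some] at this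
      simp [this]
  rw [hbuf, List.filterMap_map]
  rfl

-- ===== VERDICT (by name: the statement is the Claim_ definition above) =====
theorem recombine_elements_spec : Claim_equal_recombine_elements := by
  intro ce tabs texts ti xi _hdom _hpre
  unfold Spec_recombine_elements
  rw [pv_alt_eq]
  unfold recombine_elements
  rw [pv_foldl_if2 (fun i : Nat => (i : Int) ∈ ti) (fun i : Nat => (i : Int) ∈ xi)]
  simp only [List.nil_append]
  apply List.filterMap_congr
  intro j _
  unfold pvSlot
  rfl
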